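-- pv_equiv track=rewrite | github.com/Darqhan/PythonGCSE_Hun | 19_futar.py | kifizetendo
-- ===== SOURCE A (Python) =====
-- def kifizetendo(tav):
--     fizetseg = 0
--     for i in range(1,tav+1):
--         if((i==1)or(i==2)):
--             fizetseg+=500
--         elif ( (i>2)and(i<=5) ):
--             fizetseg+=700
--         elif ((i>5)and(i<=10)):
--             fizetseg+=900
--         elif ((i>10)and(i<=20)):
--             fizetseg += 1400
--         elif((i>20)and(i<=30)):
--             fizetseg+=2000
--     return fizetseg
-- ===== SOURCE B (Python) =====
-- def kifizetendo(tav):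
--     total = 0
--     for lo, hi, rate in ((1, 2, 500), (3, 5, 700), (6, 10, 900), (11, 20, 1400), (21, 30, 2000)):
--         if tav >= lo:
--             total += rate * (min(tav, hi) - lo + 1)
--     return total
-- ===== Notes on version B (the rewrite author's own statement) =====
-- stated objective: faster
-- what changed: Replaced the per-kilometre loop over range(1, tav+1) by a closed-form piecewise prefix sum: for each of the five fixed fee tiers add rate * (overlap of [lo, hi] with [1, tav]), computed in O(1).
import Mathlib
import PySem

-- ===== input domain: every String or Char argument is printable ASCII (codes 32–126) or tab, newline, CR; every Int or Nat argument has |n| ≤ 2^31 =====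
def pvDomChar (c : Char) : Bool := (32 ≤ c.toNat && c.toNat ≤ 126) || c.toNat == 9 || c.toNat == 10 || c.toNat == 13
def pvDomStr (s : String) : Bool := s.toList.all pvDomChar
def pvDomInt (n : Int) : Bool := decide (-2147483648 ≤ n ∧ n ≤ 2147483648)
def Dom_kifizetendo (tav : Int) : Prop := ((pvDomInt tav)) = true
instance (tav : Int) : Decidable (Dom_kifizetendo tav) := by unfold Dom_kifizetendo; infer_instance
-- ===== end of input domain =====

-- B replaces A's per-kilometre loop by an O(1) closed-form sum over the five fixed tiers (objective: faster).

-- ===== PORT A =====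
def kifizetendo (tav : Int) : Int :=
  (PySem.List.pyRange 1 (tav + 1) 1).foldl (fun fizetseg i =>
    if i = 1 ∨ i = 2 then fizetseg + 500
    else if 2 < i ∧ i ≤ 5 then fizetseg + 700
    else if 5 < i ∧ i ≤ 10 then fizetseg + 900
    else if 10 < i ∧ i ≤ 20 then fizetseg + 1400
    else if 20 < i ∧ i ≤ 30 then fizetseg + 2000
    else fizetseg) 0

-- ===== PORT B =====
def kifizetendo_alt (tav : Int) : Int :=
  [((1 : Int), (2 : Int), (500 : Int)), (3, 5, 700), (6, 10, 900), (11, 20, 1400), (21, 30, 2000)].foldl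
    (fun total t => if t.1 ≤ tav then total + t.2.2 * (min tav t.2.1 - t.1 + 1) else total) 0

-- ===== PRECONDITION & SPEC =====
def Spec_kifizetendo (tav : Int) (out : Int) : Prop := out = kifizetendo_alt tav
instance (tav : Int) (out : Int) : Decidable (Spec_kifizetendo tav out) := by unfold Spec_kifizetendo; infer_instance

-- ===== CLAIM (what is proved, stated in full; the proofs are below) =====
def Claim_equal_kifizetendo : Prop := ∀ (tav : Int), Dom_kifizetendo tav → Spec_kifizetendo tav (kifizetendo tav)

-- ===== LEMMAS AND PROOFS =====

-- B's closed form at 0 and its increment as tav steps up by 1 (matching A's loop body at i = tav+1)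
theorem alt_zero_of_nonpos (tav : Int) (h : tav ≤ 0) : kifizetendo_alt tav = 0 := by
  simp only [kifizetendo_alt, List.foldl]
  split_ifs <;> omega

-- B adds nothing beyond 30 km: its value is stable past the last tier
set_option maxHeartbeats 1000000 in
theorem alt_stable (n : Int) (h : 30 ≤ n) : kifizetendo_alt (n + 1) = kifizetendo_alt n := by
  simp only [kifizetendo_alt, List.foldl]
  split_ifs <;> omega

theorem key (m : Nat) : kifizetendo (m : Int) = kifizetendo_alt (m : Int) := by
  induction m with
  | zero =>
      simp [kifizetendo, alt_zero_of_nonpos]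
  | succ k ih =>
      have hk : (1 : Int) ≤ (k : Int) + 1 := by omega
      have hstep : PySem.List.pyRange 1 ((k : Int) + 1 + 1) 1 =
          PySem.List.pyRange 1 ((k : Int) + 1) 1 ++ [(k : Int) + 1] :=
        PySem.List.pyRange_one_succ_right hk
      unfold kifizetendo at ih ⊢
      push_cast
      rw [hstep, List.foldl_append, ih]
      simp only [List.foldl]
      by_cases hk : 30 ≤ (k : Int)
      · have hs := alt_stable (k : Int) hk
        split_ifs <;> omega
      · have hk' : k < 30 := by omega
        interval_cases k <;> decide

theorem kifizetendo_eq (tav : Int) : kifizetendo tav = kifizetendo_alt tav := by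
  by_cases h : tav ≤ 0
  · have hr : PySem.List.pyRange 1 (tav + 1) 1 = [] := by
      rw [PySem.List.pyRange_one]
      have : (tav + 1 - 1).toNat = 0 := by omega
      simp [this]
      omega
    rw [kifizetendo, hr, alt_zero_of_nonpos tav h]
    rfl
  · push_neg at h
    have : tav = ((tav.toNat : Nat) : Int) := by omega
    rw [this]
    exact key tav.toNat

-- ===== VERDICT (by name: the statement is the Claim_ definition above) =====
theorem kifizetendo_spec : Claim_equal_kifizetendo := by
  intro tav _
  exact kifizetendo_eq tav
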